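-- pv_equiv track=rewrite | github.com/ChironJC/sparse-matrix | Sparse_new.py | graRepSpar
-- ===== SOURCE A (Python) =====
-- def graRepSpar(A):
--     # Store a sparse matrix
--     n = len(A)
--     adj = []
--     xadj = []
--     count = 0
--     for i in range(0,n):
--         xadj.append(count)
--         for j in range(0,n):
--             if A[i][j] == 1:
--                 adj.append(j)
--                 count += 1
--     xadj.append(count)
--     return [adj, xadj]
-- ===== SOURCE B (Python) =====
-- def graRepSpar(A):
--     # Build the CSR pair back-to-front: walk the rows in reverse, prepend each
--     # row's set columns to adj, and rebuild xadj by shifting the already-built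
--     # offsets by the row's count (no running counter threaded through a scan).
--     n = len(A)
--     adj = []
--     xadj = [0]
--     for row in reversed(A):
--         cols = [j for j in range(n) if row[j] == 1]
--         adj = cols + adj
--         xadj = [0] + [len(cols) + x for x in xadj]
--     return [adj, xadj]
-- ===== Notes on version B (the rewrite author's own statement) =====
-- stated objective: alternative
-- what changed: B traverses the rows in reverse and builds both outputs back-to-front: adj by prepending each row's set columns, xadj by shifting the previously built offset list by the row's count, instead of threading one running counter through a forward double loop.
import Mathlib
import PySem

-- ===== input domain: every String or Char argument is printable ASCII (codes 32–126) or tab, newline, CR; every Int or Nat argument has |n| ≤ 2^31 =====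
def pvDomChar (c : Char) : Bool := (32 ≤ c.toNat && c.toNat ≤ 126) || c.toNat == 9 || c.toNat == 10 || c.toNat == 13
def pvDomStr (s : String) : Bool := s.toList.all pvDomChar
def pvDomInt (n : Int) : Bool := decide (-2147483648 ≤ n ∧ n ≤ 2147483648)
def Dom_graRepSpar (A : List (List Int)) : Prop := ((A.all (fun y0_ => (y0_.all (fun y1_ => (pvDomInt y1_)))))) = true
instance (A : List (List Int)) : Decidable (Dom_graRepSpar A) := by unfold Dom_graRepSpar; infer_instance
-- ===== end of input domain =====

-- B builds both CSR outputs back-to-front over reversed rows, shifting offsets instead of threading a counter (alternative decomposition, not claimed faster).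


-- ===== PORT A =====
-- A[i][j] (i, j are in-range under Pre_; out-of-range reads, excluded by Pre_, default to 0)
def pvEntry (A : List (List Int)) (i j : Int) : Int :=
  (PySem.List.pyGet? ((PySem.List.pyGet? A i).getD []) j).getD 0

def graRepSpar (A : List (List Int)) : List (List Int) :=
  let n : Int := A.length
  let st := (PySem.List.pyRange 0 n 1).foldl
    (fun (st : List Int × List Int × Int) i =>
      let xadj := st.2.1 ++ [st.2.2]
      let inner := (PySem.List.pyRange 0 n 1).foldl
        (fun (st2 : List Int × Int) j =>
          if pvEntry A i j == 1 then (st2.1 ++ [j], st2.2 + 1) else st2)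
        (st.1, st.2.2)
      (inner.1, xadj, inner.2))
    ([], [], 0)
  [st.1, st.2.1 ++ [st.2.2]]

-- ===== PORT B =====
-- row[j] (j in-range under Pre_; out-of-range reads, excluded by Pre_, default to 0)
def pvRowEntry (row : List Int) (j : Int) : Int :=
  (PySem.List.pyGet? row j).getD 0

def graRepSpar_alt (A : List (List Int)) : List (List Int) :=
  let n : Int := A.length
  let st := A.reverse.foldl
    (fun (st : List Int × List Int) row =>
      let cols := (PySem.List.pyRange 0 n 1).filter (fun j => pvRowEntry row j == 1)
      (cols ++ st.1, 0 :: st.2.map (fun x => (cols.length : Int) + x)))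
    ([], [0])
  [st.1, st.2]

-- ===== PRECONDITION & SPEC =====
-- Pre_ excludes exactly the inputs where Python A raises IndexError: a row shorter than len(A).
def Pre_graRepSpar (A : List (List Int)) : Prop := ∀ r ∈ A, A.length ≤ r.length
instance (A : List (List Int)) : Decidable (Pre_graRepSpar A) := by unfold Pre_graRepSpar; infer_instance
def pvWitness_graRepSpar : List (List Int) := [[1, 0], [1, 1]]

def Spec_graRepSpar (A : List (List Int)) (out : List (List Int)) : Prop := out = graRepSpar_alt A
instance (A : List (List Int)) (out : List (List Int)) : Decidable (Spec_graRepSpar A out) := by unfold Spec_graRepSpar; infer_instance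

-- ===== CLAIM (what is proved, stated in full; the proofs are below) =====
def Claim_equal_graRepSpar : Prop := ∀ (A : List (List Int)), Dom_graRepSpar A → Pre_graRepSpar A → Spec_graRepSpar A (graRepSpar A)

-- ===== LEMMAS AND PROOFS =====

-- row start offsets as A builds them, starting at count c
def prefA (rs : List (List Int)) (c : Int) : List Int :=
  match rs with
  | [] => []
  | r :: rs => c :: prefA rs (c + r.length)

def sumLen (rs : List (List Int)) : Int :=
  rs.foldr (fun r acc => (r.length : Int) + acc) 0

theorem inner_eq (A : List (List Int)) (i : Int) (L : List Int) (adj : List Int) (c : Int) :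
    L.foldl (fun (st2 : List Int × Int) j =>
        if pvEntry A i j == 1 then (st2.1 ++ [j], st2.2 + 1) else st2) (adj, c)
    = (adj ++ L.filter (fun j => pvEntry A i j == 1),
       c + ((L.filter (fun j => pvEntry A i j == 1)).length : Int)) := by
  induction L generalizing adj c with
  | nil => simp
  | cons x xs ih =>
    simp only [List.foldl_cons, List.filter_cons]
    cases hx : (pvEntry A i x == 1) with
    | true =>
      simp only [reduceIte]
      rw [ih]
      refine Prod.ext (by simp) ?_
      simp only [List.length_cons]
      push_cast
      ring
    | false =>
      simp only [Bool.false_eq_true, if_false]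
      exact ih adj c

theorem outer_eq (A : List (List Int)) (g : Int → List Int)
    (hg : ∀ i, g i = (PySem.List.pyRange 0 (A.length : Int) 1).filter (fun j => pvEntry A i j == 1))
    (L : List Int) (adj xadj : List Int) (c : Int) :
    L.foldl
      (fun (st : List Int × List Int × Int) i =>
        let xadj := st.2.1 ++ [st.2.2]
        let inner := (PySem.List.pyRange 0 (A.length : Int) 1).foldl
          (fun (st2 : List Int × Int) j =>
            if pvEntry A i j == 1 then (st2.1 ++ [j], st2.2 + 1) else st2)
          (st.1, st.2.2)
        (inner.1, xadj, inner.2))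
      (adj, xadj, c)
    = (adj ++ (L.map g).flatten, xadj ++ prefA (L.map g) c, c + sumLen (L.map g)) := by
  induction L generalizing adj xadj c with
  | nil => simp [prefA, sumLen]
  | cons x xs ih =>
    simp only [List.foldl_cons, List.map_cons, List.flatten_cons, prefA, sumLen, List.foldr_cons]
    rw [inner_eq, ih, hg]
    simp [sumLen, List.append_assoc, add_assoc]

-- shifting a prefix-offset list shifts its start
theorem prefA_shift (rs : List (List Int)) (d c : Int) :
    prefA rs (d + c) = (prefA rs c).map (fun x => d + x) := by
  induction rs generalizing c with
  | nil => simp [prefA]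
  | cons r rs ih =>
    simp only [prefA, List.map_cons, List.cons.injEq, true_and]
    rw [add_assoc]
    exact ih (c + r.length)

-- B's reversed fold computes the flattened columns and the full offset list
theorem bfold_eq (col : List Int → List Int) (A : List (List Int)) :
    A.reverse.foldl
      (fun (st : List Int × List Int) row =>
        let cols := col row
        (cols ++ st.1, 0 :: st.2.map (fun x => ((cols.length : Int)) + x)))
      ([], [0])
    = ((A.map col).flatten, prefA (A.map col) 0 ++ [sumLen (A.map col)]) := by
  rw [List.foldl_reverse]
  induction A with
  | nil => simp [prefA, sumLen]
  | cons r rs ih =>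
    simp only [List.foldr_cons, List.map_cons, List.flatten_cons, prefA, sumLen, List.foldr_cons]
    rw [ih]
    refine Prod.ext rfl ?_
    simp only [List.map_append, List.map_cons, List.map_nil]
    have h1 : prefA (rs.map col) ((col r).length : Int)
        = (prefA (rs.map col) 0).map (fun x => ((col r).length : Int) + x) := by
      have := prefA_shift (rs.map col) ((col r).length : Int) 0
      simpa using this
    rw [← h1]
    simp [sumLen, zero_add]

-- under no hypothesis, the per-row column lists indexed through A equal those read from the rows
theorem rows_eq (A : List (List Int)) :
    (PySem.List.pyRange 0 (A.length : Int) 1).map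
        (fun i => (PySem.List.pyRange 0 (A.length : Int) 1).filter (fun j => pvEntry A i j == 1))
    = A.map (fun row => (PySem.List.pyRange 0 (A.length : Int) 1).filter (fun j => pvRowEntry row j == 1)) := by
  apply List.ext_getElem
  · simp [PySem.List.length_pyRange_one]
  · intro k h1 h2
    simp only [List.getElem_map]
    rw [PySem.List.getElem_pyRange_one]
    congr 1
    funext j
    have hk : k < A.length := by simpa using h2
    unfold pvEntry pvRowEntry
    rw [show ((0 : Int) + k) = ((k : Nat) : Int) by simp]
    rw [PySem.List.pyGet?_natCast]
    simp [hk]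

-- ===== VERDICT (by name: the statement is the Claim_ definition above) =====
theorem graRepSpar_spec : Claim_equal_graRepSpar := by
  intro A _ _
  unfold Spec_graRepSpar graRepSpar graRepSpar_alt
  simp only
  rw [outer_eq A (fun i => (PySem.List.pyRange 0 (A.length : Int) 1).filter (fun j => pvEntry A i j == 1)) (fun _ => rfl),
      bfold_eq (fun row => (PySem.List.pyRange 0 (A.length : Int) 1).filter (fun j => pvRowEntry row j == 1)) A]
  rw [rows_eq]
  simp
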